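-- pv_equiv track=rewrite | github.com/PepeluiMoreno/opendatamanager | app/services/grouping/inferer.py | _common_path_prefix_segments
-- ===== SOURCE A (Python) =====
-- from typing import Any, Dict, List, Optional, Tuple
--
-- def _common_path_prefix_segments(all_segments: List[List[str]]) -> List[str]:
--     """Prefijo común máximo a NIVEL DE SEGMENTO (no de carácter).
--
--     Excluye el último segmento (filename) de cada URL para el cálculo.
--
--     Cap de seguridad: el prefijo nunca consume TODOS los segmentos de path,
--     se reserva al menos uno para que cada propuesta conserve un segmento
--     identificador (de lo contrario, URLs hermanas perderían toda estructura).
--     Para una sola URL, devuelve [] (no hay prefijo "común" significativo).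
--     """
--     if not all_segments or len(all_segments) < 2:
--         return []
--     paths_only = [segs[:-1] for segs in all_segments if len(segs) >= 1]
--     if not paths_only or not paths_only[0]:
--         return []
--     min_len = min(len(p) for p in paths_only)
--     cap = max(0, min_len - 1)  # reservar al menos 1 segmento
--     prefix: List[str] = []
--     for i in range(cap):
--         candidate = paths_only[0][i]
--         if all(p[i] == candidate for p in paths_only):
--             prefix.append(candidate)
--         else:
--             break
--     return prefix
-- ===== SOURCE B (Python) =====
-- from typing import List
--
-- def _common_path_prefix_segments(all_segments: List[List[str]]) -> List[str]:
--     if len(all_segments) < 2: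
--         return []
--     paths_only = [segs[:-1] for segs in all_segments if segs]
--     if not paths_only or not paths_only[0]:
--         return []
--     def lcp(a: List[str], b: List[str]) -> List[str]:
--         k = 0
--         while k < len(a) and k < len(b) and a[k] == b[k]:
--             k += 1
--         return a[:k]
--     prefix = paths_only[0]
--     for p in paths_only[1:]:
--         prefix = lcp(prefix, p)
--     min_len = min(len(p) for p in paths_only)
--     return prefix[:max(0, min_len - 1)]
-- ===== Notes on version B (the rewrite author's own statement) =====
-- stated objective: alternative
-- what changed: Replaces A's column-by-column index loop (with an inner all(...) scan of every path per position) by a row-wise fold of a pairwise longest-common-prefix helper over the paths, followed by a single truncation to max(0, min_len-1).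
import Mathlib
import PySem

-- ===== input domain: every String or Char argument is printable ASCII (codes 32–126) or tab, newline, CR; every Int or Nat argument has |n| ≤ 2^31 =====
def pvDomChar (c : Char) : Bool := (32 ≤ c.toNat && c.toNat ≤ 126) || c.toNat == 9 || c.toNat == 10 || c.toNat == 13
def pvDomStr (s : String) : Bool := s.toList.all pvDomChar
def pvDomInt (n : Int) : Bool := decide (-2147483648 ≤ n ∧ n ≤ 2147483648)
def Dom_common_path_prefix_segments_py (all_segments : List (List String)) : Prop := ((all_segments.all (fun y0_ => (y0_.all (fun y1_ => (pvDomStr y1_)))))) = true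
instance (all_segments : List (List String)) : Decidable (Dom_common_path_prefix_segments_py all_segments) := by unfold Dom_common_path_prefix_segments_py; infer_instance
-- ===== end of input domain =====

-- B replaces A's column-by-column scan (index loop with an inner all(...) pass per position)
-- by a row-wise fold of a pairwise longest-common-prefix, then one truncation; objective: alternative.

-- ===== PORT A =====
-- A's 'for i in range(cap): ... else: break' loop; whenever the loop body runs,
-- i < cap ≤ min_len - 1 < len p for every p, so Python's p[i] never raises and
-- List.getD is exact for it here.
def pyALoop (paths_only : List (List String)) (i cap : Nat) : List String :=
  if _h : i < cap then
    let candidate := (paths_only.headD []).getD i ""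
    if paths_only.all (fun p => p.getD i "" == candidate) then
      candidate :: pyALoop paths_only (i + 1) cap
    else []
  else []
termination_by cap - i

def common_path_prefix_segments_py (all_segments : List (List String)) : List String :=
  if all_segments = [] ∨ all_segments.length < 2 then []
  else
    -- [segs[:-1] for segs in all_segments if len(segs) >= 1]; segs[:-1] = dropLast (exact)
    let paths_only := (all_segments.filter (fun segs => 1 ≤ segs.length)).map List.dropLast
    match paths_only with
    | [] => []                                -- 'not paths_only'
    | p0 :: rest =>
      if p0 = [] then []                      -- 'not paths_only[0]'
      else
        -- min(len(p) for p in paths_only)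
        let min_len := rest.foldl (fun m p => min m p.length) p0.length
        let cap := min_len - 1                -- max(0, min_len - 1): Nat subtraction
        pyALoop (p0 :: rest) 0 cap

-- ===== PORT B =====
-- Source B's inner 'lcp' while-loop as the obvious structural recursion
def altLcp : List String → List String → List String
  | x :: xs, y :: ys => if x == y then x :: altLcp xs ys else []
  | _, _ => []

def common_path_prefix_segments_py_alt (all_segments : List (List String)) : List String :=
  if all_segments.length < 2 then []
  else
    let paths_only := (all_segments.filter (fun segs => segs ≠ [])).map List.dropLast
    match paths_only with
    | [] => []
    | p0 :: rest =>
      if p0 = [] then []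
      else
        let pref := rest.foldl altLcp p0      -- for p in paths_only[1:]: prefix = lcp(prefix, p)
        let min_len := rest.foldl (fun m p => min m p.length) p0.length
        pref.take (min_len - 1)             -- prefix[:max(0, min_len - 1)]

-- ===== PRECONDITION & SPEC =====
def Spec_common_path_prefix_segments_py (all_segments : List (List String)) (out : List String) : Prop := out = common_path_prefix_segments_py_alt all_segments
instance (all_segments : List (List String)) (out : List String) : Decidable (Spec_common_path_prefix_segments_py all_segments out) := by unfold Spec_common_path_prefix_segments_py; infer_instance

-- ===== CLAIM (what is proved, stated in full; the proofs are below) =====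
def Claim_equal_common_path_prefix_segments_py : Prop := ∀ (all_segments : List (List String)), Dom_common_path_prefix_segments_py all_segments → Spec_common_path_prefix_segments_py all_segments (common_path_prefix_segments_py all_segments)

-- ===== LEMMAS AND PROOFS =====

theorem altLcp_prefix_left (a b : List String) : altLcp a b <+: a := by
  induction a generalizing b with
  | nil => cases b <;> simp [altLcp]
  | cons x xs ih =>
    cases b with
    | nil => simp [altLcp]
    | cons y ys =>
      simp only [altLcp]
      split
      · exact List.cons_prefix_cons.mpr ⟨rfl, ih ys⟩
      · exact List.nil_prefix

theorem altLcp_prefix_right (a b : List String) : altLcp a b <+: b := by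
  induction a generalizing b with
  | nil => cases b <;> simp [altLcp]
  | cons x xs ih =>
    cases b with
    | nil => simp [altLcp]
    | cons y ys =>
      simp only [altLcp]
      split
      · rename_i h
        exact List.cons_prefix_cons.mpr ⟨by simpa using h, ih ys⟩
      · exact List.nil_prefix

theorem altLcp_mismatch (a b : List String)
    (ha : (altLcp a b).length < a.length) (hb : (altLcp a b).length < b.length) :
    a.getD (altLcp a b).length "" ≠ b.getD (altLcp a b).length "" := by
  induction a generalizing b with
  | nil => simp [altLcp] at ha
  | cons x xs ih =>
    cases b with
    | nil => exact absurd hb (Nat.not_lt_zero _)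
    | cons y ys =>
      by_cases h : x == y
      · have hunf : altLcp (x :: xs) (y :: ys) = x :: altLcp xs ys := by
          simp [altLcp, h]
        rw [hunf] at ha hb ⊢
        simpa using ih ys (by simpa using ha) (by simpa using hb)
      · have hunf : altLcp (x :: xs) (y :: ys) = [] := by
          simp [altLcp, h]
        rw [hunf]
        simpa using fun hxy => h (by simp [hxy])

theorem prefix_getD {u v : List String} (h : u <+: v) {i : Nat} (hi : i < u.length) :
    v.getD i "" = u.getD i "" := by
  rw [List.getD_eq_getElem _ _ hi, List.getD_eq_getElem _ _ (hi.trans_le h.length_le)]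
  exact (List.IsPrefix.getElem h hi).symm

theorem foldLcp_prefix_init (rest : List (List String)) (p0 : List String) :
    rest.foldl altLcp p0 <+: p0 := by
  induction rest generalizing p0 with
  | nil => exact List.prefix_refl _
  | cons q qs ih => exact (ih (altLcp p0 q)).trans (altLcp_prefix_left p0 q)

theorem foldLcp_prefix_mem (rest : List (List String)) (p0 : List String)
    {p : List String} (hp : p ∈ rest) : rest.foldl altLcp p0 <+: p := by
  induction rest generalizing p0 with
  | nil => cases hp
  | cons q qs ih =>
    rcases List.mem_cons.mp hp with h | h
    · subst h
      exact (foldLcp_prefix_init qs (altLcp p0 p)).trans (altLcp_prefix_right p0 p)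
    · exact ih _ h

theorem foldLcp_mismatch (rest : List (List String)) (p0 : List String)
    (h0 : (rest.foldl altLcp p0).length < p0.length)
    (hr : ∀ p ∈ rest, (rest.foldl altLcp p0).length < p.length) :
    ∃ p ∈ rest, p.getD (rest.foldl altLcp p0).length "" ≠ p0.getD (rest.foldl altLcp p0).length "" := by
  induction rest generalizing p0 with
  | nil => exact absurd h0 (lt_irrefl _)
  | cons q qs ih =>
    rw [List.foldl_cons] at h0 hr ⊢
    by_cases hlt : (qs.foldl altLcp (altLcp p0 q)).length < (altLcp p0 q).length
    · obtain ⟨p, hpm, hne⟩ := ih (altLcp p0 q) hlt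
        (fun p hp => hr p (List.mem_cons_of_mem _ hp))
      refine ⟨p, List.mem_cons_of_mem _ hpm, ?_⟩
      rw [prefix_getD (altLcp_prefix_left p0 q) hlt]
      exact hne
    · have hle : (qs.foldl altLcp (altLcp p0 q)).length ≤ (altLcp p0 q).length :=
        (foldLcp_prefix_init qs _).length_le
      have heq : (qs.foldl altLcp (altLcp p0 q)).length = (altLcp p0 q).length := by omega
      refine ⟨q, List.mem_cons_self, ?_⟩
      rw [heq]
      exact fun h =>
        altLcp_mismatch p0 q (heq ▸ h0) (heq ▸ hr q List.mem_cons_self) h.symm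

theorem foldl_min_le_init (rest : List (List String)) (a : Nat) :
    rest.foldl (fun m p => min m p.length) a ≤ a := by
  induction rest generalizing a with
  | nil => exact le_refl _
  | cons q qs ih => exact (ih _).trans (min_le_left _ _)

theorem foldl_min_le_mem (rest : List (List String)) (a : Nat)
    {p : List String} (hp : p ∈ rest) :
    rest.foldl (fun m p => min m p.length) a ≤ p.length := by
  induction rest generalizing a with
  | nil => cases hp
  | cons q qs ih =>
    rcases List.mem_cons.mp hp with h | h
    · subst h
      exact (foldl_min_le_init qs _).trans (min_le_right _ _)
    · exact ih _ h

theorem pyALoop_eq (p0 : List String) (rest : List (List String)) (cap : Nat)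
    (h0 : cap < p0.length) (hr : ∀ p ∈ rest, cap < p.length) :
    ∀ i, i ≤ (rest.foldl altLcp p0).length →
      pyALoop (p0 :: rest) i cap = ((rest.foldl altLcp p0).drop i).take (cap - i) := by
  intro i
  induction hn : cap - i generalizing i with
  | zero =>
    intro _
    rw [pyALoop]
    simp [show ¬ i < cap from by omega]
  | succ n ih =>
    intro hiF
    have hic : i < cap := by omega
    rw [pyALoop]
    simp only [hic, dif_pos, List.headD_cons]
    by_cases hiFlt : i < (rest.foldl altLcp p0).length
    case neg =>
      have heq : i = (rest.foldl altLcp p0).length := le_antisymm hiF (not_lt.mp hiFlt)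
      obtain ⟨p, hpm, hne⟩ := foldLcp_mismatch rest p0 (by omega)
        (fun p hp => by have := hr p hp; omega)
      rw [← heq] at hne
      have hallf : ((p0 :: rest).all (fun p => p.getD i "" == p0.getD i "")) = false := by
        rw [List.all_eq_false]
        exact ⟨p, List.mem_cons_of_mem _ hpm, by simpa using hne⟩
      rw [hallf]
      subst heq
      simp
    have hagree : ∀ p ∈ (p0 :: rest), p.getD i "" = p0.getD i "" := by
      intro p hp
      rcases List.mem_cons.mp hp with h | h
      · rw [h]
      · rw [prefix_getD (foldLcp_prefix_mem rest p0 h) hiFlt,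
            prefix_getD (foldLcp_prefix_init rest p0) hiFlt]
    have hall : ((p0 :: rest).all (fun p => p.getD i "" == p0.getD i "")) = true := by
      simp only [List.all_eq_true]
      intro p hp
      simpa using hagree p hp
    have hdrop : (rest.foldl altLcp p0).drop i
        = (rest.foldl altLcp p0).getD i "" :: (rest.foldl altLcp p0).drop (i + 1) := by
      rw [List.getD_eq_getElem _ _ hiFlt]
      exact List.drop_eq_getElem_cons hiFlt
    rw [if_pos hall, ih (i + 1) (by omega) hiFlt, hdrop, List.take_succ_cons,
        prefix_getD (foldLcp_prefix_init rest p0) hiFlt]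

theorem pyALoop_zero_cap (paths : List (List String)) (i : Nat) :
    pyALoop paths i 0 = [] := by
  rw [pyALoop]; simp

theorem filters_eq (l : List (List String)) :
    l.filter (fun segs => 1 ≤ segs.length) = l.filter (fun segs => segs ≠ []) := by
  apply List.filter_congr
  intro x _
  cases x <;> simp

theorem main_eq (all_segments : List (List String)) :
    common_path_prefix_segments_py all_segments = common_path_prefix_segments_py_alt all_segments := by
  unfold common_path_prefix_segments_py common_path_prefix_segments_py_alt
  by_cases hlen : all_segments.length < 2
  · simp [hlen]
  · have hne : ¬ (all_segments = [] ∨ all_segments.length < 2) := by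
      rintro (h | h)
      · exact hlen (by simp [h])
      · exact hlen h
    rw [if_neg hne, if_neg hlen, filters_eq]
    cases hpaths : (all_segments.filter (fun segs => segs ≠ [])).map List.dropLast with
    | nil => rfl
    | cons p0 rest =>
      dsimp only
      by_cases hp0 : p0 = []
      · simp [hp0]
      · rw [if_neg hp0, if_neg hp0]
        rcases Nat.eq_zero_or_pos (rest.foldl (fun m p => min m p.length) p0.length) with hz | hpos
        · rw [hz]
          simp [pyALoop_zero_cap]
        · have hcap0 : rest.foldl (fun m p => min m p.length) p0.length - 1 < p0.length :=
            lt_of_lt_of_le (by omega) (foldl_min_le_init rest p0.length)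
          have hcapr : ∀ p ∈ rest, rest.foldl (fun m p => min m p.length) p0.length - 1 < p.length := fun p hp =>
            lt_of_lt_of_le (by omega) (foldl_min_le_mem rest p0.length hp)
          rw [pyALoop_eq p0 rest _ hcap0 hcapr 0 (Nat.zero_le _)]
          simp

-- ===== VERDICT (by name: the statement is the Claim_ definition above) =====
theorem common_path_prefix_segments_py_spec : Claim_equal_common_path_prefix_segments_py := by
  intro all_segments _
  unfold Spec_common_path_prefix_segments_py
  exact main_eq all_segments
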